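-- pv_equiv track=rewrite | github.com/haboutnnah/cs1917 | week1/something_awesome/4001_instructions.py | iterate_through_options
-- ===== SOURCE A (Python) =====
-- from itertools import combinations
--
-- def iterate_through_options(length: int, aim, ADDS: dict) -> list:
--     """
--     Goes through all combinations of a list where len(combo) == length.
--     Returns a list of a combination that matches the aim, or an empty list.
--     """
--     combination_arr = combinations(ADDS.keys(),length)
--     combo = []
--     for option in combination_arr:
--         if len(combo) == 0:
--             if sum(option) == aim:
--                 for item in option:
--                     combo.append(ADDS[item])
--     return combo
-- ===== SOURCE B (Python) =====
-- def iterate_through_options(length: int, aim, ADDS: dict) -> list: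
--     """Recursive take-or-skip backtracking over the keys (index order), with a
--     can't-complete prune; returns the mapped first matching combination, else []."""
--     keys = list(ADDS.keys())
--
--     def search(ks, need, chosen):
--         if need == 0:
--             return [ADDS[k] for k in chosen] if sum(chosen) == aim else None
--         if need < 0 or need > len(ks):
--             return None
--         taken = search(ks[1:], need - 1, chosen + [ks[0]])
--         if taken is not None:
--             return taken
--         return search(ks[1:], need, chosen)
--
--     res = search(keys, length, [])
--     return [] if res is None else res
-- ===== Notes on version B (the rewrite author's own statement) =====
-- stated objective: alternative
-- what changed: Replaced itertools' materialised scan of all combinations (which keeps iterating after a match) with a recursive take-or-skip backtracking search over the key list that prunes branches that cannot pick enough keys and returns on the first matching combination.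
import Mathlib
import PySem

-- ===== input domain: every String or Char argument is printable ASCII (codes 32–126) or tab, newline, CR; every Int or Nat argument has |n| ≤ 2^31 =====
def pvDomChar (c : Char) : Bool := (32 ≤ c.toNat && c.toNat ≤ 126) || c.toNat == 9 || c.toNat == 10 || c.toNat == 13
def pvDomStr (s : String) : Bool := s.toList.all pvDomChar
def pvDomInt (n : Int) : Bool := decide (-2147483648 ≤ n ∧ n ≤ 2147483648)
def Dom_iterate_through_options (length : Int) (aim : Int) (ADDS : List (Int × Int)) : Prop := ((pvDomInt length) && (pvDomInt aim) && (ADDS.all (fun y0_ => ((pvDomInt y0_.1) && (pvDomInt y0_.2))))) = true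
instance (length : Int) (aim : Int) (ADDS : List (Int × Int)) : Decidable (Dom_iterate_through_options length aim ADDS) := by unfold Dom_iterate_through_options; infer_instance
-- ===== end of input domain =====

-- B replaces A's materialisation of every combination (itertools) and full scan with a
-- recursive take-or-skip backtracking search that returns on the first match (alternative decomposition).

-- ===== PORT A =====
-- port of itertools.combinations(keys, n) in itertools' order (lexicographic by index)
def pyCombos : Nat → List Int → List (List Int)
  | 0, _ => [[]]
  | _ + 1, [] => []
  | n + 1, x :: xs => (pyCombos n xs).map (fun o => x :: o) ++ pyCombos (n + 1) xs

def iterate_through_options (length : Int) (aim : Int) (ADDS : List (Int × Int)) : List Int :=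
  let d := PySem.Dict.ofList ADDS
  (pyCombos length.toNat d.keys).foldl
    (fun combo option =>
      if combo.length = 0 then
        if option.sum = aim then combo ++ option.map (fun item => d.getD item 0) else combo
      else combo) []

-- ===== PORT B =====
-- port of Source B's nested `search`: take-or-skip recursion over the key list, first hit wins
def bSearch (aim : Int) (d : PySem.Dict Int Int) (need : Int) (ks : List Int) (chosen : List Int) :
    Option (List Int) :=
  if need = 0 then
    if chosen.sum = aim then some (chosen.map (fun k => d.getD k 0)) else none
  else if need < 0 ∨ need > (ks.length : Int) then none
  else
    match ks with
    | [] => none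
    | x :: xs =>
      match bSearch aim d (need - 1) xs (chosen ++ [x]) with
      | some r => some r
      | none => bSearch aim d need xs chosen

def iterate_through_options_alt (length : Int) (aim : Int) (ADDS : List (Int × Int)) : List Int :=
  let d := PySem.Dict.ofList ADDS
  match bSearch aim d length d.keys [] with
  | some r => r
  | none => []

-- ===== PRECONDITION & SPEC =====
-- Pre_ excludes only length < 0, where Python's itertools.combinations raises ValueError.
def Pre_iterate_through_options (length : Int) (_aim : Int) (_ADDS : List (Int × Int)) : Prop :=
  0 ≤ length
instance (length : Int) (aim : Int) (ADDS : List (Int × Int)) : Decidable (Pre_iterate_through_options length aim ADDS) := by unfold Pre_iterate_through_options; infer_instance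

def pvWitness_iterate_through_options : Int × Int × (List (Int × Int)) := (2, 5, [(2, 10), (3, 20), (4, 30)])

def Spec_iterate_through_options (length : Int) (aim : Int) (ADDS : List (Int × Int)) (out : List Int) : Prop := out = iterate_through_options_alt length aim ADDS
instance (length : Int) (aim : Int) (ADDS : List (Int × Int)) (out : List Int) : Decidable (Spec_iterate_through_options length aim ADDS out) := by unfold Spec_iterate_through_options; infer_instance

-- ===== CLAIM (what is proved, stated in full; the proofs are below) =====
def Claim_equal_iterate_through_options : Prop := ∀ (length : Int) (aim : Int) (ADDS : List (Int × Int)), Dom_iterate_through_options length aim ADDS → Pre_iterate_through_options length aim ADDS → Spec_iterate_through_options length aim ADDS (iterate_through_options length aim ADDS)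


-- ===== LEMMAS AND PROOFS =====

-- every member of pyCombos n l has length n
lemma pyCombos_length {n : Nat} {l : List Int} {o : List Int} (h : o ∈ pyCombos n l) :
    o.length = n := by
  induction l generalizing n o with
  | nil =>
    cases n with
    | zero => simp [pyCombos] at h; simp [h]
    | succ m => simp [pyCombos] at h
  | cons x xs ih =>
    cases n with
    | zero => simp [pyCombos] at h; simp [h]
    | succ m =>
      simp only [pyCombos, List.mem_append, List.mem_map] at h
      rcases h with ⟨o', ho', rfl⟩ | h
      · simp [ih ho']
      · exact ih h

-- no combination of size n > |l|
lemma pyCombos_eq_nil {n : Nat} {l : List Int} (h : l.length < n) : pyCombos n l = [] := by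
  induction l generalizing n with
  | nil => cases n with
    | zero => omega
    | succ m => simp [pyCombos]
  | cons x xs ih =>
    cases n with
    | zero => omega
    | succ m =>
      simp only [pyCombos]
      rw [ih (by simp at h ⊢; omega), ih (by simp at h ⊢; omega)]
      simp

-- B's search is the first match (in pyCombos order) among size-n extensions of `chosen`
lemma bSearch_eq (aim : Int) (d : PySem.Dict Int Int) (ks : List Int) (n : Nat)
    (chosen : List Int) :
    bSearch aim d (n : Int) ks chosen =
      ((pyCombos n ks).find? (fun o => (chosen ++ o).sum == aim)).map
        (fun o => (chosen ++ o).map (fun k => d.getD k 0)) := by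
  induction ks generalizing n chosen with
  | nil =>
    cases n with
    | zero =>
      rw [bSearch]
      by_cases hs : chosen.sum = aim <;> simp [pyCombos, List.find?, hs]
    | succ m =>
      rw [bSearch]
      rw [if_neg (by push_cast; omega : ¬(((m + 1 : Nat)) : Int) = 0),
        if_pos (Or.inr (by simp only [List.length_nil, Nat.cast_zero]; push_cast; omega))]
      simp [pyCombos]
  | cons x xs ih =>
    cases n with
    | zero =>
      rw [bSearch]
      by_cases hs : chosen.sum = aim <;> simp [pyCombos, List.find?, hs]
    | succ m =>
      rw [bSearch]
      rw [if_neg (by push_cast; omega : ¬(((m + 1 : Nat)) : Int) = 0)]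
      by_cases hbig : (((m + 1 : Nat)) : Int) > (((x :: xs).length : Nat) : Int)
      · rw [if_pos (Or.inr hbig)]
        have h1 : pyCombos m xs = [] := pyCombos_eq_nil (by simp at hbig ⊢; omega)
        have h2 : pyCombos (m + 1) xs = [] := pyCombos_eq_nil (by simp at hbig ⊢; omega)
        simp [pyCombos, h1, h2]
      · rw [if_neg (by push_cast at hbig ⊢; omega)]
        have hm1 : (((m + 1 : Nat)) : Int) - 1 = ((m : Nat) : Int) := by push_cast; ring
        rw [hm1, ih m (chosen ++ [x]), ih (m + 1) chosen]
        simp only [pyCombos, List.find?_append, List.find?_map]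
        have hp : ((fun o => (chosen ++ o).sum == aim) ∘ (fun o => x :: o)) =
            (fun o => ((chosen ++ [x]) ++ o).sum == aim) := by
          funext a; simp [List.append_assoc]
        rw [← hp]
        cases hfind : (pyCombos m xs).find? ((fun o => (chosen ++ o).sum == aim) ∘ (fun o => x :: o)) with
        | some o => simp [Option.or, List.append_assoc]
        | none => simp [Option.or]

-- A's fold keeps a nonempty accumulator unchanged
lemma foldA_ne_nil (aim : Int) (d : PySem.Dict Int Int) (l : List (List Int))
    (acc : List Int) (h : acc ≠ []) :
    l.foldl (fun combo option =>
      if combo.length = 0 then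
        if option.sum = aim then combo ++ option.map (fun item => d.getD item 0) else combo
      else combo) acc = acc := by
  induction l with
  | nil => rfl
  | cons o rest ih =>
    simp only [List.foldl_cons]
    rw [if_neg (by simpa [List.length_eq_zero_iff] using h)]
    exact ih

-- A's fold from [] computes the first match, provided no member maps to []
lemma foldA_eq_find (aim : Int) (d : PySem.Dict Int Int) (l : List (List Int))
    (h : ∀ o ∈ l, o ≠ []) :
    l.foldl (fun combo option =>
      if combo.length = 0 then
        if option.sum = aim then combo ++ option.map (fun item => d.getD item 0) else combo
      else combo) [] =
      ((l.find? (fun o => o.sum == aim)).map (fun o => o.map (fun k => d.getD k 0))).getD [] := by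
  induction l with
  | nil => rfl
  | cons o rest ih =>
    simp only [List.foldl_cons, List.find?_cons, List.length_nil]
    by_cases hs : o.sum = aim
    · have hne : o.map (fun k => d.getD k 0) ≠ [] := by
        simpa using h o (by simp)
      rw [if_pos trivial, if_pos hs, List.nil_append,
        foldA_ne_nil aim d rest _ hne]
      simp [hs]
    · have hb : (o.sum == aim) = false := by simp [hs]
      rw [if_pos trivial, if_neg hs, ih (fun o ho => h o (by simp [ho])), hb]

theorem iterate_through_options_spec : Claim_equal_iterate_through_options := by
  intro length aim ADDS _ hpre
  obtain ⟨n, rfl⟩ : ∃ n : Nat, length = (n : Int) :=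
    ⟨length.toNat, (Int.toNat_of_nonneg hpre).symm⟩
  simp only [Spec_iterate_through_options, iterate_through_options,
    iterate_through_options_alt, Int.toNat_natCast]
  rw [bSearch_eq aim (PySem.Dict.ofList ADDS) (PySem.Dict.ofList ADDS).keys n []]
  cases n with
  | zero =>
    by_cases hs : (0 : Int) = aim <;>
      simp [pyCombos, List.find?, List.foldl, hs]
  | succ m =>
    rw [foldA_eq_find aim (PySem.Dict.ofList ADDS) _ (fun o ho => by
      have := pyCombos_length ho; intro hnil; simp [hnil] at this)]
    simp only [List.nil_append]
    cases hfind : (pyCombos (m + 1) (PySem.Dict.ofList ADDS).keys).find? (fun o => o.sum == aim) <;>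
      simp
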